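-- pv_equiv track=rewrite | github.com/charlie2233/RestaurantCommentValidation_Analysis | src/qsr_audit/reporting/scorecards.py | _validation_findings_by_brand
-- ===== SOURCE A (Python) =====
-- from typing import Any
--
-- def _validation_findings_by_brand(
--     findings: tuple[dict[str, Any], ...],
-- ) -> dict[str, list[dict[str, Any]]]:
--     grouped: dict[str, list[dict[str, Any]]] = {}
--     for finding in findings:
--         brand_name = finding.get("brand_name")
--         if not brand_name:
--             continue
--         grouped.setdefault(str(brand_name), []).append(finding)
--     return grouped
-- ===== SOURCE B (Python) =====
-- def _validation_findings_by_brand(findings):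
--     kept = [(str(f["brand_name"]), f) for f in findings if f.get("brand_name")]
--     keys = list(dict.fromkeys(k for k, _ in kept))
--     return {k: [f for kk, f in kept if kk == k] for k in keys}
-- ===== Notes on version B (the rewrite author's own statement) =====
-- stated objective: alternative
-- what changed: Replaced the single-pass dict accumulation (setdefault+append) by a dict-free two-phase pipeline: materialize the (key, finding) pairs, dedupe the keys in first-appearance order, then gather each group with a scan per key.
import Mathlib
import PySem

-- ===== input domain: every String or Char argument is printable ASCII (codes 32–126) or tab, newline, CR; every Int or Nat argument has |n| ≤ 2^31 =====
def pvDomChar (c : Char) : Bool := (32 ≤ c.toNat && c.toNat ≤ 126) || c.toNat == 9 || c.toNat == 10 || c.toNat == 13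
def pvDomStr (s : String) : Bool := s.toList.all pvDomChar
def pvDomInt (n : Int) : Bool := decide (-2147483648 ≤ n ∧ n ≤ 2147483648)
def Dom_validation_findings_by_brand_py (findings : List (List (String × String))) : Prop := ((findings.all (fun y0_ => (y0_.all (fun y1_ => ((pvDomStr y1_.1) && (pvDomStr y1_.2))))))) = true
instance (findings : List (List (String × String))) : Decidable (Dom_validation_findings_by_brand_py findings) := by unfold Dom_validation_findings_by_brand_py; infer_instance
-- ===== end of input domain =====

-- B replaces A's single-pass dict accumulation by a dict-free two-phase pipeline
-- (materialize keyed pairs, dedupe keys in first-appearance order, gather each group);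
-- objective: alternative (same results, genuinely different structure, no speed claim).

-- ===== PORT A =====
def validation_findings_by_brand_py (findings : List (List (String × String))) : List (String × List (List (String × String))) :=
  (findings.foldl (fun grouped finding =>
      match (PySem.Dict.mk finding).get? "brand_name" with
      | none => grouped
      | some b => if b = "" then grouped
          else grouped.modify b [] (· ++ [finding]))
    PySem.Dict.empty).items

-- ===== PORT B =====
-- helper of Source B: the kept (str(brand_name), finding) pairs, in order
def pvKept (findings : List (List (String × String))) : List (String × List (String × String)) :=
  findings.foldl (fun kept finding =>
      match (PySem.Dict.mk finding).get? "brand_name" with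
      | none => kept
      | some b => if b = "" then kept else kept ++ [(b, finding)]) []

def validation_findings_by_brand_py_alt (findings : List (List (String × String))) : List (String × List (List (String × String))) :=
  let kept := pvKept findings
  let keys := PySem.List.dedup (kept.map Prod.fst)
  keys.map (fun k => (k, (kept.filter (fun p => p.1 == k)).map Prod.snd))

-- ===== PRECONDITION & SPEC =====
def Spec_validation_findings_by_brand_py (findings : List (List (String × String))) (out : List (String × List (List (String × String)))) : Prop := out = validation_findings_by_brand_py_alt findings
instance (findings : List (List (String × String))) (out : List (String × List (List (String × String)))) : Decidable (Spec_validation_findings_by_brand_py findings out) := by unfold Spec_validation_findings_by_brand_py; infer_instance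

-- ===== CLAIM (what is proved, stated in full; the proofs are below) =====
def Claim_equal_validation_findings_by_brand_py : Prop := ∀ (findings : List (List (String × String))), Dom_validation_findings_by_brand_py findings → Spec_validation_findings_by_brand_py findings (validation_findings_by_brand_py findings)

-- ===== LEMMAS AND PROOFS =====

-- pvKept's fold from an arbitrary accumulator
theorem pvKept_fold (findings : List (List (String × String))) (acc : List (String × List (String × String))) :
    findings.foldl (fun kept finding =>
      match (PySem.Dict.mk finding).get? "brand_name" with
      | none => kept
      | some b => if b = "" then kept else kept ++ [(b, finding)]) acc
    = acc ++ pvKept findings := by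
  induction findings generalizing acc with
  | nil => simp only [List.foldl_nil, pvKept, List.append_nil]
  | cons f fs ih =>
      cases h : (PySem.Dict.mk f).get? "brand_name" with
      | none =>
          simp only [List.foldl_cons, h, pvKept]
          rw [ih]
          rfl
      | some b =>
          by_cases hb : b = ""
          · simp only [List.foldl_cons, h, hb, if_true, pvKept]
            rw [ih]
            rfl
          · simp only [List.foldl_cons, h, if_neg hb, pvKept]
            rw [ih, ih (acc := [] ++ [(b, f)])]
            simp

-- the kept pairs of a cons, split off
theorem pvKept_cons (f : List (String × String)) (fs : List (List (String × String))) :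
    pvKept (f :: fs)
    = (match (PySem.Dict.mk f).get? "brand_name" with
       | none => ([] : List (String × List (String × String)))
       | some b => if b = "" then [] else [(b, f)]) ++ pvKept fs := by
  cases h : (PySem.Dict.mk f).get? "brand_name" with
  | none =>
      simp only [pvKept, List.foldl_cons, h]
      rfl
  | some b =>
      by_cases hb : b = ""
      · simp only [pvKept, List.foldl_cons, h, hb, if_true]
        rfl
      · simp only [pvKept, List.foldl_cons, h, if_neg hb]
        rw [show ([] : List (String × List (String × String))) ++ [(b, f)] = [(b, f)] from rfl,
            pvKept_fold]
        rfl

-- A's loop over findings is the modify-append loop over the kept pairs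
theorem foldA_eq_foldl_kept (findings : List (List (String × String)))
    (d : PySem.Dict String (List (List (String × String)))) :
    findings.foldl (fun grouped finding =>
      match (PySem.Dict.mk finding).get? "brand_name" with
      | none => grouped
      | some b => if b = "" then grouped
          else grouped.modify b [] (· ++ [finding])) d
    = (pvKept findings).foldl (fun d p => d.modify p.1 [] (· ++ [p.2])) d := by
  induction findings generalizing d with
  | nil => simp only [List.foldl_nil, pvKept]
  | cons f fs ih =>
      rw [pvKept_cons]
      cases h : (PySem.Dict.mk f).get? "brand_name" with
      | none => simp only [List.foldl_cons, h, List.nil_append, ih]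
      | some b =>
          by_cases hb : b = ""
          · simp only [List.foldl_cons, h, hb, if_true, List.nil_append, ih]
          · simp only [List.foldl_cons, h, if_neg hb, List.cons_append, List.nil_append, ih]

theorem validation_findings_by_brand_py_spec : Claim_equal_validation_findings_by_brand_py := by
  intro findings _
  unfold Spec_validation_findings_by_brand_py
  unfold validation_findings_by_brand_py validation_findings_by_brand_py_alt
  rw [foldA_eq_foldl_kept]
  set l := pvKept findings with hl
  have hnd : ((l.foldl (fun d p => d.modify p.1 [] (· ++ [p.2])) PySem.Dict.empty)).keys.Nodup := by
    exact PySem.Dict.nodup_keys_foldl_modify_key l Prod.fst [] (fun d p => (· ++ [p.2]))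
      PySem.Dict.empty (by simp [pysem])
  rw [PySem.Dict.items_eq_map_keys _ hnd []]
  have hkeys : ((l.foldl (fun d p => d.modify p.1 [] (· ++ [p.2])) PySem.Dict.empty)).keys
      = PySem.List.dedup (l.map Prod.fst) := by
    rw [PySem.Dict.keys_foldl_modify_key (key := Prod.fst) (d0 := []) (f := fun d p => (· ++ [p.2]))]
    simp only [PySem.Dict.keys_empty, PySem.Set.update_nil_left, PySem.List.dedup_eq_ofList]
  rw [hkeys]
  apply List.map_congr_left
  intro k _
  have hg := PySem.Dict.getD_foldl_modify_append l PySem.Dict.empty k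
  simp only [PySem.Dict.getD_empty, List.nil_append] at hg
  simp [hg]
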